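-- pv_equiv track=rewrite | github.com/zhengziying78/tinybug | temporal/github/test_analyzer.py | _summarize_tests
-- ===== SOURCE A (Python) =====
-- from typing import Any, Dict, List, Optional
--
-- def _summarize_tests(tests: List[Dict[str, Any]]) -> Dict[str, int]:
--     """Return aggregate counts for junit test outcomes."""
--     summary = {
--         'total': len(tests),
--         'passed': 0,
--         'failed': 0,
--         'errors': 0,
--         'skipped': 0,
--     }
--     for test in tests:
--         status = test.get('status')
--         if status == 'passed':
--             summary['passed'] += 1
--         elif status == 'failed':
--             summary['failed'] += 1
--         elif status == 'error':
--             summary['errors'] += 1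
--         elif status == 'skipped':
--             summary['skipped'] += 1
--     return summary
-- ===== SOURCE B (Python) =====
-- from typing import Any, Dict, List
--
-- def _summarize_tests(tests: List[Dict[str, Any]]) -> Dict[str, int]:
--     """Return aggregate counts for junit test outcomes (extract, then count each status)."""
--     statuses = [test.get('status') for test in tests]
--     return {
--         'total': len(statuses),
--         'passed': statuses.count('passed'),
--         'failed': statuses.count('failed'),
--         'errors': statuses.count('error'),
--         'skipped': statuses.count('skipped'),
--     }
-- ===== Notes on version B (the rewrite author's own statement) =====
-- stated objective: simpler
-- what changed: Replaces A's single stateful pass (if/elif chain incrementing five pre-seeded dict slots in place) by a stateless staged computation: extract the status list once, then build the summary dict directly with one .count() scan per status key (preserving the 'error'->'errors' mapping).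
import Mathlib
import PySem

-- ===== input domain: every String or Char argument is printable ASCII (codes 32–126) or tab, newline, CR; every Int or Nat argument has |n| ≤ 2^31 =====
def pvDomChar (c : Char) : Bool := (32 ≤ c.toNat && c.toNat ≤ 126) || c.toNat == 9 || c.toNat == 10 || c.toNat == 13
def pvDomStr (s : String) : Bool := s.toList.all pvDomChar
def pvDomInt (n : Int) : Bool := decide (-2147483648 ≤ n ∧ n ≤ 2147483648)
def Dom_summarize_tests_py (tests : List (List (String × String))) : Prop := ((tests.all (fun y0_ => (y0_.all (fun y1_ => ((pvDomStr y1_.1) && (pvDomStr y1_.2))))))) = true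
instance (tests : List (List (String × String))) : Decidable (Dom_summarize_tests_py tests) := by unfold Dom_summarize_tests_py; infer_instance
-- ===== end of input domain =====

-- B extracts the status list once and builds the summary by counting each status with its own
-- scan, instead of A's single stateful pass incrementing a pre-seeded dict in place (simpler).

-- ===== PORT A =====
-- one loop step of A: status = test.get('status'); if/elif increments
def pvStepA (d : PySem.Dict String Int) (test : List (String × String)) : PySem.Dict String Int :=
  let status := (PySem.Dict.mk test).get? "status"
  if status = some "passed" then d.insert "passed" (d.getD "passed" 0 + 1)
  else if status = some "failed" then d.insert "failed" (d.getD "failed" 0 + 1)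
  else if status = some "error" then d.insert "errors" (d.getD "errors" 0 + 1)
  else if status = some "skipped" then d.insert "skipped" (d.getD "skipped" 0 + 1)
  else d

def summarize_tests_py (tests : List (List (String × String))) : List (String × Int) :=
  let summary : PySem.Dict String Int :=
    PySem.Dict.ofList [("total", (tests.length : Int)), ("passed", 0), ("failed", 0), ("errors", 0), ("skipped", 0)]
  (tests.foldl pvStepA summary).items

-- ===== PORT B =====
def summarize_tests_py_alt (tests : List (List (String × String))) : List (String × Int) :=
  let statuses : List (Option String) := tests.map (fun test => (PySem.Dict.mk test).get? "status")
  [("total", (statuses.length : Int)),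
   ("passed", PySem.List.count statuses (some "passed")),
   ("failed", PySem.List.count statuses (some "failed")),
   ("errors", PySem.List.count statuses (some "error")),
   ("skipped", PySem.List.count statuses (some "skipped"))]

-- ===== PRECONDITION & SPEC =====
def Spec_summarize_tests_py (tests : List (List (String × String))) (out : List (String × Int)) : Prop := out = summarize_tests_py_alt tests
instance (tests : List (List (String × String))) (out : List (String × Int)) : Decidable (Spec_summarize_tests_py tests out) := by unfold Spec_summarize_tests_py; infer_instance

-- ===== CLAIM (what is proved, stated in full; the proofs are below) =====
def Claim_equal_summarize_tests_py : Prop := ∀ (tests : List (List (String × String))), Dom_summarize_tests_py tests → Spec_summarize_tests_py tests (summarize_tests_py tests)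

-- ===== LEMMAS AND PROOFS =====

-- the explicit five-slot dict A's loop maintains
def pvMk5 (t p f e s : Int) : PySem.Dict String Int :=
  PySem.Dict.mk [("total", t), ("passed", p), ("failed", f), ("errors", e), ("skipped", s)]

def pvStat (test : List (String × String)) : Option String := (PySem.Dict.mk test).get? "status"

-- A's fold characterised: each slot accumulates the count of its status
lemma foldA_mk5 (tests : List (List (String × String))) :
    ∀ (t p f e s : Int),
      tests.foldl pvStepA (pvMk5 t p f e s) =
        pvMk5 t (p + ((tests.map pvStat).count (some "passed")))
               (f + ((tests.map pvStat).count (some "failed")))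
               (e + ((tests.map pvStat).count (some "error")))
               (s + ((tests.map pvStat).count (some "skipped"))) := by
  induction tests with
  | nil => intro t p f e s; simp [pvMk5]
  | cons x xs ih =>
    intro t p f e s
    simp only [List.foldl_cons, List.map_cons, List.count_cons]
    by_cases h1 : pvStat x = some "passed"
    · have hs : pvStepA (pvMk5 t p f e s) x = pvMk5 t (p + 1) f e s := by
        have h1' : (PySem.Dict.mk x).get? "status" = some "passed" := h1
        simp [pvStepA, pvMk5, h1']; rfl
      rw [hs, ih]
      simp [pvMk5, h1]
      omega
    · by_cases h2 : pvStat x = some "failed"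
      · have hs : pvStepA (pvMk5 t p f e s) x = pvMk5 t p (f + 1) e s := by
          have h2' : (PySem.Dict.mk x).get? "status" = some "failed" := h2
          simp [pvStepA, pvMk5, h2']; rfl
        rw [hs, ih]
        simp [pvMk5, h2]
        omega
      · by_cases h3 : pvStat x = some "error"
        · have hs : pvStepA (pvMk5 t p f e s) x = pvMk5 t p f (e + 1) s := by
            have h3' : (PySem.Dict.mk x).get? "status" = some "error" := h3
            simp [pvStepA, pvMk5, h3']; rfl
          rw [hs, ih]
          simp [pvMk5, h3]
          omega
        · by_cases h4 : pvStat x = some "skipped"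
          · have hs : pvStepA (pvMk5 t p f e s) x = pvMk5 t p f e (s + 1) := by
              have h4' : (PySem.Dict.mk x).get? "status" = some "skipped" := h4
              simp [pvStepA, pvMk5, h4']; rfl
            rw [hs, ih]
            simp [pvMk5, h4]
            omega
          · have hs : pvStepA (pvMk5 t p f e s) x = pvMk5 t p f e s := by
              have h1' : ¬ (PySem.Dict.mk x).get? "status" = some "passed" := h1
              have h2' : ¬ (PySem.Dict.mk x).get? "status" = some "failed" := h2
              have h3' : ¬ (PySem.Dict.mk x).get? "status" = some "error" := h3
              have h4' : ¬ (PySem.Dict.mk x).get? "status" = some "skipped" := h4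
              simp [pvStepA, h1', h2', h3', h4']
            rw [hs, ih]
            simp [pvMk5, h1, h2, h3, h4]

-- ===== VERDICT (by name: the statement is the Claim_ definition above) =====
theorem summarize_tests_py_spec : Claim_equal_summarize_tests_py := by
  intro tests _
  unfold Spec_summarize_tests_py
  have h := foldA_mk5 tests ((tests.length : Int)) 0 0 0 0
  simp only [pvMk5] at h
  unfold pvStat at h
  simp only [summarize_tests_py, summarize_tests_py_alt]
  rw [show PySem.Dict.ofList [(("total" : String), (tests.length : Int)), ("passed", 0), ("failed", 0), ("errors", 0), ("skipped", 0)] =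
      PySem.Dict.mk [("total", (tests.length : Int)), ("passed", 0), ("failed", 0), ("errors", 0), ("skipped", 0)] from rfl, h]
  simp [PySem.List.count]
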